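-- pv_equiv track=rewrite | github.com/kcharris/AdventOfCode2025 | Day10/answer1.py | findMinPresses
-- ===== SOURCE A (Python) =====
-- from functools import cache
--
-- M = 10**9+7
--
-- def findMinPresses(lights, buttons):
--     target_mask = 0
--     for i in range(len(lights)):
--         target_mask = target_mask << 1
--         if lights[i] == "#":
--             target_mask += 1
--
--     def applyButton(button, mask) -> int:
--         for b in button:
--             mask ^= 1 << (len(lights)-b-1)
--         return mask
--
--     @cache
--     def helper(i, mask):
--         if mask == target_mask:
--             return 0
--         if i >= len(buttons):
--             return M
--
--
--         left = 1 + helper(i+1, applyButton(buttons[i], mask))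
--         right = helper(i+1, mask)
--         return min(left, right)
--     return helper(0, 0)
-- ===== SOURCE B (Python) =====
-- M = 10**9 + 7
--
-- def findMinPresses(lights, buttons):
--     n = len(lights)
--     target = 0
--     for ch in lights:
--         target = target * 2 + (1 if ch == "#" else 0)
--     if target == 0:
--         return 0
--     dp = {0: 0}
--     for button in buttons:
--         bm = 0
--         for b in button:
--             bm ^= 1 << (n - b - 1)
--         new = dict(dp)
--         for mask, cnt in dp.items():
--             nm = mask ^ bm
--             new[nm] = min(new.get(nm, M), cnt + 1)
--         dp = new
--     return dp.get(target, M)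
-- ===== Notes on version B (the rewrite author's own statement) =====
-- stated objective: alternative
-- what changed: Replaces A's top-down cached recursion keyed on (button index, mask) by a bottom-up dict DP over reachable masks: each button's toggle mask is built once and relaxes dp[mask ^ bm] = min(old, dp[mask] + 1) over a snapshot of the table, returning dp.get(target, 10**9+7).
import Mathlib
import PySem

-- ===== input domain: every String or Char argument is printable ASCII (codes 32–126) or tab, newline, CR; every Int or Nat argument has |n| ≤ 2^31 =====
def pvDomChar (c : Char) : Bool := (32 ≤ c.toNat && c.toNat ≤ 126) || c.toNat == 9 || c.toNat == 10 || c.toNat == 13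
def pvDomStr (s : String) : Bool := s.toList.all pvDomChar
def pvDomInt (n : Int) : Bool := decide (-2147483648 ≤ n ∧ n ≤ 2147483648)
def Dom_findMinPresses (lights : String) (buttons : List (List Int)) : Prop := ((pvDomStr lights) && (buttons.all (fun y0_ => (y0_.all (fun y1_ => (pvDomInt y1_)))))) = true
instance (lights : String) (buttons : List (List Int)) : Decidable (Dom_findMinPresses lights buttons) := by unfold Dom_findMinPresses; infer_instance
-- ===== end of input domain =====

-- B replaces A's top-down cached recursion on (button index, mask) by a bottom-up dict DP over
-- reachable masks (mask -> minimum presses), one relaxation pass per button.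

-- ===== PORT A =====
def pvM : Int := 1000000007

def targetA (lights : String) : Nat :=
  lights.toList.foldl (fun t c => if c = '#' then (t <<< 1) + 1 else t <<< 1) 0

def applyButtonA (n : Int) (button : List Int) (mask : Nat) : Nat :=
  button.foldl (fun m b => m ^^^ ((1 : Nat) <<< (n - b - 1).toNat)) mask

def helperA (target : Nat) (n : Int) (bs : List (List Int)) (mask : Nat) : Int :=
  if mask = target then 0
  else
    match bs with
    | [] => pvM
    | b :: rest =>
      min (1 + helperA target n rest (applyButtonA n b mask)) (helperA target n rest mask)

def findMinPresses (lights : String) (buttons : List (List Int)) : Int :=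
  helperA (targetA lights) (PySem.Str.len lights) buttons 0

-- ===== PORT B =====
def targetB (lights : String) : Nat :=
  lights.toList.foldl (fun t c => 2 * t + (if c = '#' then 1 else 0)) 0

def buttonMaskB (n : Int) (button : List Int) : Nat :=
  button.foldl (fun m b => m ^^^ ((1 : Nat) <<< (n - b - 1).toNat)) 0

def stepB (bm : Nat) (dp : PySem.Dict Nat Int) : PySem.Dict Nat Int :=
  dp.items.foldl (fun new p => new.insert (p.1 ^^^ bm) (min (new.getD (p.1 ^^^ bm) pvM) (p.2 + 1))) dp

def findMinPresses_alt (lights : String) (buttons : List (List Int)) : Int :=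
  if targetB lights = 0 then 0
  else
    (buttons.foldl (fun dp button => stepB (buttonMaskB (PySem.Str.len lights) button) dp)
      (PySem.Dict.ofList [((0 : Nat), (0 : Int))])).getD (targetB lights) pvM

-- ===== PRECONDITION & SPEC =====
-- Pre_ excludes exactly the inputs where Python A raises a ValueError (negative shift count):
-- some light is '#' (so buttons are actually applied) and some button index b satisfies b ≥ len(lights).
def Pre_findMinPresses (lights : String) (buttons : List (List Int)) : Prop :=
  '#' ∈ lights.toList → ∀ btn ∈ buttons, ∀ b ∈ btn, b < PySem.Str.len lights
instance (lights : String) (buttons : List (List Int)) : Decidable (Pre_findMinPresses lights buttons) := by unfold Pre_findMinPresses; infer_instance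
def pvWitness_findMinPresses : String × List (List Int) := ("#", [[0]])

def Spec_findMinPresses (lights : String) (buttons : List (List Int)) (out : Int) : Prop := out = findMinPresses_alt lights buttons
instance (lights : String) (buttons : List (List Int)) (out : Int) : Decidable (Spec_findMinPresses lights buttons out) := by unfold Spec_findMinPresses; infer_instance

-- ===== CLAIM (what is proved, stated in full; the proofs are below) =====
def Claim_equal_findMinPresses : Prop := ∀ (lights : String) (buttons : List (List Int)), Dom_findMinPresses lights buttons → Pre_findMinPresses lights buttons → Spec_findMinPresses lights buttons (findMinPresses lights buttons)

-- ===== LEMMAS AND PROOFS =====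

-- ---- facts about A's recursion ----
theorem helperA_nil (t : Nat) (n : Int) (mask : Nat) : helperA t n [] mask = if mask = t then 0 else pvM := by
  unfold helperA; split <;> rfl

theorem helperA_nonneg (t : Nat) (n : Int) : ∀ (bs : List (List Int)) (mask : Nat), 0 ≤ helperA t n bs mask := by
  intro bs
  induction bs with
  | nil =>
    intro mask
    rw [helperA_nil]
    split
    · omega
    · norm_num [pvM]
  | cons b rest ih =>
    intro mask
    unfold helperA
    split
    · omega
    · show 0 ≤ min (1 + helperA t n rest (applyButtonA n b mask)) (helperA t n rest mask)
      have h1 := ih (applyButtonA n b mask)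
      have h2 := ih mask
      omega

theorem helperA_le (t : Nat) (n : Int) : ∀ (bs : List (List Int)) (mask : Nat), helperA t n bs mask ≤ pvM := by
  intro bs
  induction bs with
  | nil =>
    intro mask
    rw [helperA_nil]
    split
    · norm_num [pvM]
    · omega
  | cons b rest ih =>
    intro mask
    unfold helperA
    split
    · norm_num [pvM]
    · show min (1 + helperA t n rest (applyButtonA n b mask)) (helperA t n rest mask) ≤ pvM
      have h2 := ih mask
      omega

theorem helperA_self (t : Nat) (n : Int) (bs : List (List Int)) : helperA t n bs t = 0 := by
  cases bs <;> simp [helperA]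

theorem helperA_cons (t : Nat) (n : Int) (b : List Int) (rest : List (List Int)) (mask : Nat) :
    helperA t n (b :: rest) mask
      = min (1 + helperA t n rest (applyButtonA n b mask)) (helperA t n rest mask) := by
  by_cases h : mask = t
  · rw [h, helperA_self, helperA_self]
    have := helperA_nonneg t n rest (applyButtonA n b t)
    omega
  · conv_lhs => unfold helperA
    rw [if_neg h]

theorem applyButtonA_eq (btn : List Int) (n : Int) (mask : Nat) :
    applyButtonA n btn mask = mask ^^^ buttonMaskB n btn := by
  have key : ∀ (btn : List Int) (m0 m : Nat),
      btn.foldl (fun m b => m ^^^ ((1 : Nat) <<< (n - b - 1).toNat)) (m0 ^^^ m)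
        = m0 ^^^ btn.foldl (fun m b => m ^^^ ((1 : Nat) <<< (n - b - 1).toNat)) m := by
    intro btn
    induction btn with
    | nil => intro m0 m; simp
    | cons b rest ih =>
      intro m0 m
      simp only [List.foldl_cons]
      rw [Nat.xor_assoc, ih]
  have h := key btn mask 0
  rw [Nat.xor_zero] at h
  exact h

theorem targetB_eq (lights : String) : targetB lights = targetA lights := by
  unfold targetA targetB
  apply PySem.List.foldl_congr_mem
  intro acc c _
  by_cases h : c = '#' <;> simp [h, Nat.shiftLeft_eq] <;> ring

-- ---- finite minimum over a list of points ----
def tmin (f : Nat → Int) (L : List Nat) : Int := L.foldr (fun x acc => min (f x) acc) pvM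

theorem tmin_nil (f : Nat → Int) : tmin f [] = pvM := rfl

theorem tmin_cons (f : Nat → Int) (a : Nat) (L : List Nat) : tmin f (a :: L) = min (f a) (tmin f L) := rfl

theorem tmin_le_M (f : Nat → Int) (L : List Nat) : tmin f L ≤ pvM := by
  induction L with
  | nil => simp [tmin_nil]
  | cons a L ih => rw [tmin_cons]; omega

theorem tmin_le_of_mem {f : Nat → Int} {L : List Nat} {x : Nat} (h : x ∈ L) : tmin f L ≤ f x := by
  induction L with
  | nil => cases h
  | cons a L ih =>
    rw [tmin_cons]
    rcases List.mem_cons.1 h with h | h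
    · subst h; omega
    · have := ih h; omega

theorem le_tmin {f : Nat → Int} {L : List Nat} {c : Int} (hM : c ≤ pvM) (h : ∀ x ∈ L, c ≤ f x) :
    c ≤ tmin f L := by
  induction L with
  | nil => simpa [tmin_nil]
  | cons a L ih =>
    rw [tmin_cons]
    have h1 := h a (by simp)
    have h2 := ih (fun x hx => h x (by simp [hx]))
    omega

theorem tmin_attains (f : Nat → Int) (L : List Nat) : tmin f L = pvM ∨ ∃ x ∈ L, tmin f L = f x := by
  induction L with
  | nil => left; rfl
  | cons a L ih =>
    rw [tmin_cons]
    rcases le_total (f a) (tmin f L) with h | h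
    · right; exact ⟨a, by simp, by omega⟩
    · have hm : min (f a) (tmin f L) = tmin f L := by omega
      rw [hm]
      rcases ih with h' | ⟨x, hx, he⟩
      · left; exact h'
      · right; exact ⟨x, by simp [hx], he⟩

theorem tmin_congr {f g : Nat → Int} {L : List Nat} (h : ∀ x ∈ L, f x = g x) : tmin f L = tmin g L := by
  induction L with
  | nil => rfl
  | cons a L ih =>
    rw [tmin_cons, tmin_cons, h a (by simp), ih (fun x hx => h x (by simp [hx]))]

-- ---- pointwise model of B's relaxation pass ----
def stepF (bm : Nat) (g : Nat → Int) : Nat → Int := fun x => min (g x) (min (g (x ^^^ bm) + 1) pvM)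

theorem core_step (bm : Nat) (g h : Nat → Int) (L : List Nat)
    (hsupp : ∀ x, x ∉ L → g x = pvM) (hh0 : ∀ x, 0 ≤ h x) :
    tmin (fun x => stepF bm g x + h x) (L ++ L.map (· ^^^ bm))
      = tmin (fun x => g x + min (1 + h (x ^^^ bm)) (h x)) L := by
  apply le_antisymm
  · apply le_tmin (tmin_le_M _ _)
    intro x hx
    have h1 : tmin (fun x => stepF bm g x + h x) (L ++ L.map (· ^^^ bm)) ≤ stepF bm g x + h x :=
      tmin_le_of_mem (by simp [hx])
    have h2 : tmin (fun x => stepF bm g x + h x) (L ++ L.map (· ^^^ bm))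
        ≤ stepF bm g (x ^^^ bm) + h (x ^^^ bm) :=
      tmin_le_of_mem (by simp only [List.mem_append, List.mem_map]; right; exact ⟨x, hx, rfl⟩)
    have hxx : (x ^^^ bm) ^^^ bm = x := Nat.xor_xor_cancel_right x bm
    unfold stepF at h1 h2 ⊢
    rw [hxx] at h2
    omega
  · rcases tmin_attains (fun x => stepF bm g x + h x) (L ++ L.map (· ^^^ bm)) with hA | ⟨z, hz, hA⟩
    · rw [hA]; exact tmin_le_M _ _
    · rw [hA]
      have hM := tmin_le_M (fun x => g x + min (1 + h (x ^^^ bm)) (h x)) L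
      rcases List.mem_append.1 hz with hzL | hzR
      · have h1 : tmin (fun x => g x + min (1 + h (x ^^^ bm)) (h x)) L
            ≤ g z + min (1 + h (z ^^^ bm)) (h z) := tmin_le_of_mem hzL
        by_cases hzs : (z ^^^ bm) ∈ L
        · have h2 : tmin (fun x => g x + min (1 + h (x ^^^ bm)) (h x)) L
              ≤ g (z ^^^ bm) + min (1 + h ((z ^^^ bm) ^^^ bm)) (h (z ^^^ bm)) := tmin_le_of_mem hzs
          rw [Nat.xor_xor_cancel_right] at h2
          unfold stepF
          have := hh0 z
          omega
        · have hg : g (z ^^^ bm) = pvM := hsupp _ hzs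
          unfold stepF
          rw [hg]
          have := hh0 z
          omega
      · obtain ⟨y, hyL, hyz⟩ := List.mem_map.1 hzR
        subst hyz
        have hxx : (y ^^^ bm) ^^^ bm = y := Nat.xor_xor_cancel_right y bm
        have h1 : tmin (fun x => g x + min (1 + h (x ^^^ bm)) (h x)) L
            ≤ g y + min (1 + h (y ^^^ bm)) (h y) := tmin_le_of_mem hyL
        by_cases hys : (y ^^^ bm) ∈ L
        · have h2 : tmin (fun x => g x + min (1 + h (x ^^^ bm)) (h x)) L
              ≤ g (y ^^^ bm) + min (1 + h ((y ^^^ bm) ^^^ bm)) (h (y ^^^ bm)) := tmin_le_of_mem hys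
          rw [hxx] at h2
          unfold stepF
          rw [hxx]
          have := hh0 (y ^^^ bm)
          omega
        · have hg : g (y ^^^ bm) = pvM := hsupp _ hys
          unfold stepF
          rw [hxx, hg]
          have := hh0 (y ^^^ bm)
          omega

theorem tmin_base (t : Nat) (n : Int) (g : Nat → Int)
    (hg0 : ∀ x, 0 ≤ g x) (hgM : ∀ x, g x ≤ pvM) :
    ∀ L : List Nat, tmin (fun x => g x + helperA t n [] x) L = if t ∈ L then g t else pvM := by
  intro L
  induction L with
  | nil => simp [tmin_nil]
  | cons a L ih =>
    rw [tmin_cons, ih]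
    simp only [helperA_nil, List.mem_cons]
    have hga := hg0 a
    have hgt := hgM t
    by_cases hat : a = t
    · subst hat
      simp only [true_or, if_true]
      by_cases hL : a ∈ L
      · rw [if_pos hL]; omega
      · rw [if_neg hL]; omega
    · rw [if_neg hat]
      by_cases hL : t ∈ L
      · rw [if_pos hL, if_pos (Or.inr hL)]; omega
      · rw [if_neg hL, if_neg (by rintro (h | h); exact hat h.symm; exact hL h)]; omega

theorem model_fold (t : Nat) (n : Int) :
    ∀ (bs : List (List Int)) (g : Nat → Int) (L : List Nat),
      (∀ x, 0 ≤ g x) → (∀ x, g x ≤ pvM) → (∀ x, x ∉ L → g x = pvM) →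
      (bs.foldl (fun g btn => stepF (buttonMaskB n btn) g) g) t
        = tmin (fun x => g x + helperA t n bs x) L := by
  intro bs
  induction bs with
  | nil =>
    intro g L hg0 hgM hsupp
    simp only [List.foldl_nil]
    rw [tmin_base t n g hg0 hgM L]
    by_cases hL : t ∈ L
    · rw [if_pos hL]
    · rw [if_neg hL, hsupp t hL]
  | cons btn rest ih =>
    intro g L hg0 hgM hsupp
    have hMpos : (0 : Int) ≤ pvM := by norm_num [pvM]
    set bm := buttonMaskB n btn with hbm
    have hg0' : ∀ x, 0 ≤ stepF bm g x := by
      intro x; unfold stepF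
      have := hg0 x; have := hg0 (x ^^^ bm); omega
    have hgM' : ∀ x, stepF bm g x ≤ pvM := by
      intro x; unfold stepF
      have := hgM x; omega
    have hsupp' : ∀ x, x ∉ (L ++ L.map (· ^^^ bm)) → stepF bm g x = pvM := by
      intro x hx
      simp only [List.mem_append, List.mem_map, not_or, not_exists] at hx
      obtain ⟨hx1, hx2⟩ := hx
      have e1 : g x = pvM := hsupp x hx1
      have e2 : g (x ^^^ bm) = pvM := by
        apply hsupp
        intro hmem
        exact (hx2 (x ^^^ bm) ⟨hmem, Nat.xor_xor_cancel_right x bm⟩)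
      unfold stepF
      rw [e1, e2]
      omega
    calc (List.foldl (fun g btn => stepF (buttonMaskB n btn) g) g (btn :: rest)) t
        = (List.foldl (fun g btn => stepF (buttonMaskB n btn) g) (stepF bm g) rest) t := rfl
      _ = tmin (fun x => stepF bm g x + helperA t n rest x) (L ++ L.map (· ^^^ bm)) :=
          ih (stepF bm g) (L ++ L.map (· ^^^ bm)) hg0' hgM' hsupp'
      _ = tmin (fun x => g x + min (1 + helperA t n rest (x ^^^ bm)) (helperA t n rest x)) L :=
          core_step bm g (fun x => helperA t n rest x) L hsupp (helperA_nonneg t n rest)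
      _ = tmin (fun x => g x + helperA t n (btn :: rest) x) L := by
          apply tmin_congr
          intro x hx
          rw [helperA_cons, applyButtonA_eq]

-- ---- B's dict pass realizes the pointwise model ----
def gOf (dp : PySem.Dict Nat Int) : Nat → Int := fun x => dp.getD x pvM

theorem fold_sim (bm : Nat) :
    ∀ (l : List (Nat × Int)) (acc : PySem.Dict Nat Int) (a : Nat → Int),
      (∀ x, acc.getD x pvM = a x) → ∀ x,
      (l.foldl (fun new p => new.insert (p.1 ^^^ bm) (min (new.getD (p.1 ^^^ bm) pvM) (p.2 + 1))) acc).getD x pvM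
        = (l.foldl (fun a p => fun x => if x = p.1 ^^^ bm then min (a (p.1 ^^^ bm)) (p.2 + 1) else a x) a) x := by
  intro l
  induction l with
  | nil => intro acc a h x; simpa using h x
  | cons p l ih =>
    intro acc a h x
    simp only [List.foldl_cons]
    apply ih
    intro y
    rw [PySem.Dict.getD_insert]
    rw [h (p.1 ^^^ bm), h y]

theorem pure_step (bm : Nat) (g : Nat → Int) :
    ∀ (l : List (Nat × Int)) (a : Nat → Int),
      (l.map Prod.fst).Nodup → (∀ p ∈ l, p.2 = g p.1) → ∀ x,
      (l.foldl (fun a p => fun x => if x = p.1 ^^^ bm then min (a (p.1 ^^^ bm)) (p.2 + 1) else a x) a) x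
        = if (x ^^^ bm) ∈ l.map Prod.fst then min (a x) (g (x ^^^ bm) + 1) else a x := by
  intro l
  induction l with
  | nil => intro a _ _ x; simp
  | cons p l ih =>
    intro a hnd hval x
    have hndt := (List.nodup_cons.1 hnd).2
    have hhead := (List.nodup_cons.1 hnd).1
    simp only [List.foldl_cons]
    rw [ih _ hndt (fun q hq => hval q (by simp [hq])) x]
    by_cases hx : x = p.1 ^^^ bm
    · subst hx
      rw [Nat.xor_xor_cancel_right]
      rw [if_neg hhead, if_pos (show p.1 ∈ List.map Prod.fst (p :: l) by simp)]
      show (if p.1 ^^^ bm = p.1 ^^^ bm then min (a (p.1 ^^^ bm)) (p.2 + 1) else a (p.1 ^^^ bm)) = _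
      rw [if_pos rfl, hval p (by simp)]
    · have hx2 : x ^^^ bm ≠ p.1 := fun he => hx (by rw [← he, Nat.xor_xor_cancel_right])
      by_cases hm : (x ^^^ bm) ∈ List.map Prod.fst l
      · rw [if_pos hm, if_pos (show x ^^^ bm ∈ List.map Prod.fst (p :: l) by simp [hm])]
        show min (if x = p.1 ^^^ bm then min (a (p.1 ^^^ bm)) (p.2 + 1) else a x) (g (x ^^^ bm) + 1) = _
        rw [if_neg hx]
      · rw [if_neg hm, if_neg (show x ^^^ bm ∉ List.map Prod.fst (p :: l) by simp [hm, hx2])]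
        show (if x = p.1 ^^^ bm then min (a (p.1 ^^^ bm)) (p.2 + 1) else a x) = a x
        rw [if_neg hx]

theorem keys_eq_items_map (dp : PySem.Dict Nat Int) : dp.keys = dp.items.map Prod.fst := rfl

theorem gOf_stepB (bm : Nat) (dp : PySem.Dict Nat Int) (hnd : dp.keys.Nodup)
    (hb : ∀ x, 0 ≤ gOf dp x ∧ gOf dp x ≤ pvM) :
    ∀ x, gOf (stepB bm dp) x = stepF bm (gOf dp) x := by
  intro x
  have hndi : (dp.items.map Prod.fst).Nodup := by rw [← keys_eq_items_map]; exact hnd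
  have hvals : ∀ p ∈ dp.items, p.2 = gOf dp p.1 := by
    rintro ⟨k, v⟩ hp
    exact (PySem.Dict.getD_of_mem_items dp hp hnd pvM).symm
  show (stepB bm dp).getD x pvM = _
  unfold stepB
  rw [fold_sim bm dp.items dp (gOf dp) (fun _ => rfl) x]
  rw [pure_step bm (gOf dp) dp.items (gOf dp) hndi hvals x]
  unfold stepF
  have h1 := (hb x).2
  have h2 := (hb (x ^^^ bm)).2
  by_cases hm : (x ^^^ bm) ∈ dp.items.map Prod.fst
  · rw [if_pos hm]; omega
  · rw [if_neg hm]
    have he : gOf dp (x ^^^ bm) = pvM := by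
      show dp.getD (x ^^^ bm) pvM = pvM
      apply PySem.Dict.getD_of_not_contains
      cases hc : dp.contains (x ^^^ bm)
      · rfl
      · exact absurd ((PySem.Dict.contains_iff_mem_keys dp (x ^^^ bm)).1 hc)
          (by rw [keys_eq_items_map]; exact hm)
    rw [he]
    omega

theorem wf_stepB (bm : Nat) (dp : PySem.Dict Nat Int) (hnd : dp.keys.Nodup)
    (hb : ∀ x, 0 ≤ gOf dp x ∧ gOf dp x ≤ pvM) :
    (stepB bm dp).keys.Nodup ∧ ∀ x, 0 ≤ gOf (stepB bm dp) x ∧ gOf (stepB bm dp) x ≤ pvM := by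
  constructor
  · exact PySem.Dict.nodup_keys_foldl_insert_key dp.items (fun p => p.1 ^^^ bm)
      (fun new p => min (new.getD (p.1 ^^^ bm) pvM) (p.2 + 1)) dp hnd
  · intro x
    rw [gOf_stepB bm dp hnd hb x]
    unfold stepF
    have hM : pvM = 1000000007 := rfl
    have h1 := hb x
    have h2 := hb (x ^^^ bm)
    omega

theorem model_congr (n : Int) :
    ∀ (bs : List (List Int)) (g g' : Nat → Int), (∀ x, g x = g' x) → ∀ x,
      (bs.foldl (fun g btn => stepF (buttonMaskB n btn) g) g) x
        = (bs.foldl (fun g btn => stepF (buttonMaskB n btn) g) g') x := by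
  intro bs
  induction bs with
  | nil => intro g g' h x; simpa using h x
  | cons btn rest ih =>
    intro g g' h x
    simp only [List.foldl_cons]
    apply ih
    intro y
    unfold stepF
    rw [h y, h (y ^^^ buttonMaskB n btn)]

theorem port_fold (n : Int) (t : Nat) :
    ∀ (bs : List (List Int)) (dp : PySem.Dict Nat Int),
      dp.keys.Nodup → (∀ x, 0 ≤ gOf dp x ∧ gOf dp x ≤ pvM) →
      (bs.foldl (fun dp button => stepB (buttonMaskB n button) dp) dp).getD t pvM
        = (bs.foldl (fun g btn => stepF (buttonMaskB n btn) g) (gOf dp)) t := by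
  intro bs
  induction bs with
  | nil => intro dp _ _; rfl
  | cons btn rest ih =>
    intro dp hnd hb
    obtain ⟨hnd', hb'⟩ := wf_stepB (buttonMaskB n btn) dp hnd hb
    calc (List.foldl (fun dp button => stepB (buttonMaskB n button) dp) dp (btn :: rest)).getD t pvM
        = (List.foldl (fun dp button => stepB (buttonMaskB n button) dp)
            (stepB (buttonMaskB n btn) dp) rest).getD t pvM := rfl
      _ = (List.foldl (fun g btn => stepF (buttonMaskB n btn) g)
            (gOf (stepB (buttonMaskB n btn) dp)) rest) t := ih _ hnd' hb'
      _ = (List.foldl (fun g btn => stepF (buttonMaskB n btn) g)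
            (stepF (buttonMaskB n btn) (gOf dp)) rest) t :=
          model_congr n rest _ _ (gOf_stepB (buttonMaskB n btn) dp hnd hb) t
      _ = (List.foldl (fun g btn => stepF (buttonMaskB n btn) g) (gOf dp) (btn :: rest)) t := rfl

-- ---- the initial dict {0: 0} ----
theorem gOf_dp0 (x : Nat) :
    gOf (PySem.Dict.ofList [((0 : Nat), (0 : Int))]) x = if x = 0 then 0 else pvM := by
  show (PySem.Dict.ofList [((0 : Nat), (0 : Int))]).getD x pvM = _
  by_cases h : x = 0
  · subst h; rfl
  · rw [if_neg h]
    apply PySem.Dict.getD_of_not_contains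
    cases hc : (PySem.Dict.ofList [((0 : Nat), (0 : Int))]).contains x
    · rfl
    · have hm := (PySem.Dict.contains_iff_mem_keys _ x).1 hc
      have hk : (PySem.Dict.ofList [((0 : Nat), (0 : Int))]).keys = [0] := by decide
      rw [hk] at hm
      simp at hm
      exact absurd hm h

theorem dp0_nodup : (PySem.Dict.ofList [((0 : Nat), (0 : Int))]).keys.Nodup :=
  PySem.Dict.nodup_keys_ofList _

theorem dp0_bounds : ∀ x, 0 ≤ gOf (PySem.Dict.ofList [((0 : Nat), (0 : Int))]) x ∧
    gOf (PySem.Dict.ofList [((0 : Nat), (0 : Int))]) x ≤ pvM := by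
  intro x
  rw [gOf_dp0]
  have hM : pvM = 1000000007 := rfl
  split <;> omega

-- ===== VERDICT (by name: the statement is the Claim_ definition above) =====
theorem findMinPresses_spec : Claim_equal_findMinPresses := by
  intro lights buttons _ _
  show findMinPresses lights buttons = findMinPresses_alt lights buttons
  unfold findMinPresses findMinPresses_alt
  rw [targetB_eq]
  set n := PySem.Str.len lights with hn
  set t := targetA lights with ht0
  by_cases ht : t = 0
  · rw [if_pos ht, ht]
    exact helperA_self 0 n buttons
  · rw [if_neg ht]
    rw [port_fold n t buttons _ dp0_nodup dp0_bounds]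
    rw [model_fold t n buttons _ [0] (fun x => (dp0_bounds x).1) (fun x => (dp0_bounds x).2)
      (by intro x hx; rw [gOf_dp0]; rw [if_neg (by simpa using hx)])]
    have h1 := helperA_le t n buttons 0
    have h2 := helperA_nonneg t n buttons 0
    simp only [tmin_cons, tmin_nil, gOf_dp0, if_pos, zero_add]
    omega
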